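-- pv_equiv track=rewrite | github.com/aclanot/caput | sweep.py | first_entries_le
-- ===== SOURCE A (Python) =====
-- def first_entries_le(values, thresholds):
--     hits = {}
--     remaining = sorted(thresholds, reverse=True)
--     for index, value in enumerate(values):
--         while remaining and value <= remaining[0]:
--             hits[remaining.pop(0)] = index
--         if not remaining:
--             break
--     return hits
-- ===== SOURCE B (Python) =====
-- def first_entries_le(values, thresholds):
--     # Staircase of prefix minima: (value, index) at each new strict minimum.
--     records = []
--     current_min = None
--     for index, value in enumerate(values):
--         if current_min is None or value < current_min:
--             current_min = value
--             records.append((value, index))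
--     # Merge the descending unique thresholds with the descending staircase.
--     out = []
--     j = 0
--     for t in sorted(set(thresholds), reverse=True):
--         while j < len(records) and records[j][0] > t:
--             j += 1
--         if j == len(records):
--             break
--         out.append((t, records[j][1]))
--     return dict(out)
-- ===== Notes on version B (the rewrite author's own statement) =====
-- stated objective: faster
-- what changed: Instead of repeatedly popping the head of the duplicated sorted threshold list inside the value scan, B builds a prefix-minima staircase of the values in one pass and merges it once (integer pointer, no pops) against the deduplicated thresholds sorted descending.
import Mathlib
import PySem

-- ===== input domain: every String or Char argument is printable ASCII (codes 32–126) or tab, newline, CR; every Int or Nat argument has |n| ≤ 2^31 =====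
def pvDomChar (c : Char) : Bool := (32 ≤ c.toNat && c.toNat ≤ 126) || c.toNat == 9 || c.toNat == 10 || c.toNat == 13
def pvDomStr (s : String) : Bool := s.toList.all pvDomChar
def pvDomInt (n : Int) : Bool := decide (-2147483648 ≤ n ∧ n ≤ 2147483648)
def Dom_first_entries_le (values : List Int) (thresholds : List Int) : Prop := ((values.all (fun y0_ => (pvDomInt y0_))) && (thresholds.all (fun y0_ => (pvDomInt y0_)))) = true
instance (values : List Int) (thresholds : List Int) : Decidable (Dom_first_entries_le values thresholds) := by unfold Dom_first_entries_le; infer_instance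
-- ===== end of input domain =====

-- B replaces A's quadratic pop(0)-from-a-sorted-duplicated-list scan with a prefix-minima
-- staircase merged once against the descending unique thresholds (objective: faster).

-- ===== PORT A =====
-- the inner 'while remaining and value <= remaining[0]: hits[remaining.pop(0)] = index'
def pvAWhile (hits : PySem.Dict Int Int) (remaining : List Int) (value : Int) (index : Int) :
    PySem.Dict Int Int × List Int :=
  match remaining with
  | [] => (hits, [])
  | t :: rest =>
    if value ≤ t then pvAWhile (hits.insert t index) rest value index
    else (hits, t :: rest)

-- the 'for index, value in enumerate(values): … if not remaining: break' loop
def pvALoop (hits : PySem.Dict Int Int) (remaining : List Int) (index : Int) :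
    List Int → PySem.Dict Int Int
  | [] => hits
  | v :: vs =>
    match pvAWhile hits remaining v index with
    | (h, r) => if r.isEmpty then h else pvALoop h r (index + 1) vs

def first_entries_le (values : List Int) (thresholds : List Int) : List (Int × Int) :=
  (pvALoop PySem.Dict.empty (PySem.List.sorted thresholds (fun t => t) true) 0 values).items

-- ===== PORT B =====
-- staircase of strict prefix minima: (value, index) for every new minimum
def pvRecords (curMin : Option Int) (index : Int) : List Int → List (Int × Int)
  | [] => []
  | v :: vs =>
    match curMin with
    | none => (v, index) :: pvRecords (some v) (index + 1) vs
    | some mv =>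
      if v < mv then (v, index) :: pvRecords (some v) (index + 1) vs
      else pvRecords (some mv) (index + 1) vs

-- merge the descending unique thresholds with the staircase ('while j < len(records) …' = dropWhile)
def pvMerge : List Int → List (Int × Int) → List (Int × Int)
  | [], _ => []
  | t :: ts, recs =>
    match recs.dropWhile (fun p => decide (t < p.1)) with
    | [] => []
    | (v, idx) :: rest => (t, idx) :: pvMerge ts ((v, idx) :: rest)

def first_entries_le_alt (values : List Int) (thresholds : List Int) : List (Int × Int) :=
  (PySem.Dict.ofList
    (pvMerge (PySem.List.sorted (PySem.Set.ofList thresholds) (fun t => t) true)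
      (pvRecords none 0 values))).items

-- ===== PRECONDITION & SPEC =====
def Spec_first_entries_le (values : List Int) (thresholds : List Int) (out : List (Int × Int)) : Prop := out = first_entries_le_alt values thresholds
instance (values : List Int) (thresholds : List Int) (out : List (Int × Int)) : Decidable (Spec_first_entries_le values thresholds out) := by unfold Spec_first_entries_le; infer_instance

-- ===== CLAIM (what is proved, stated in full; the proofs are below) =====
def Claim_equal_first_entries_le : Prop := ∀ (values : List Int) (thresholds : List Int), Dom_first_entries_le values thresholds → Spec_first_entries_le values thresholds (first_entries_le values thresholds)

-- ===== LEMMAS AND PROOFS =====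

-- first index j with values[j] ≤ t (the quantity both programs compute per threshold)
def pvF (vs : List Int) (t : Int) : Option Nat := vs.findIdx? (fun v => decide (v ≤ t))

-- collapse adjacent duplicates (what A's duplicate-keyed dict inserts amount to)
def pvCdd : List Int → List Int
  | [] => []
  | [a] => [a]
  | a :: b :: rest => if a = b then pvCdd (b :: rest) else a :: pvCdd (b :: rest)

def pvInsertAll (h : PySem.Dict Int Int) (ts : List Int) (i : Int) : PySem.Dict Int Int :=
  ts.foldl (fun d t => d.insert t i) h

lemma pv_insert_twice (d : PySem.Dict Int Int) (k : Int) (v : Int) :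
    (d.insert k v).insert k v = d.insert k v := by
  have hc : (d.insert k v).contains k = true := by simp [pysem]
  have hmap : ∀ p ∈ (d.insert k v).items,
      (if (p.1 == k) = true then (k, v) else p) = p := by
    intro p hp
    by_cases h : p.1 = k
    · rcases (PySem.Dict.mem_items_insert d k v p).1 hp with h1 | h1
      · simp [h1]
      · exact absurd h h1.2
    · simp [h]
  generalize hE : d.insert k v = e at hc hmap ⊢
  obtain ⟨l⟩ := e
  show PySem.Dict.insert ⟨l⟩ k v = ⟨l⟩
  unfold PySem.Dict.insert
  rw [if_pos hc]
  congr 1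
  rw [List.map_congr_left hmap]
  simp

lemma pvCdd_cons (b : Int) (rest : List Int) : ∃ l', pvCdd (b :: rest) = b :: l' := by
  induction rest generalizing b with
  | nil => exact ⟨[], rfl⟩
  | cons c r ih =>
    by_cases h : b = c
    · obtain ⟨l', hl⟩ := ih c
      exact ⟨l', by simp [pvCdd, h, hl]⟩
    · exact ⟨pvCdd (c :: r), by simp [pvCdd, h]⟩
lemma pv_mem_cdd (l : List Int) (x : Int) : x ∈ pvCdd l ↔ x ∈ l := by
  induction l with
  | nil => simp [pvCdd]
  | cons a l ih =>
    cases l with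
    | nil => simp [pvCdd]
    | cons b rest =>
      by_cases h : a = b
      · subst h
        have hcdd : pvCdd (a :: a :: rest) = pvCdd (a :: rest) := by simp [pvCdd]
        rw [hcdd, ih]
        simp [List.mem_cons]
      · have hcdd : pvCdd (a :: b :: rest) = a :: pvCdd (b :: rest) := by simp [pvCdd, h]
        rw [hcdd, List.mem_cons, ih]
        simp [List.mem_cons]

lemma pvCdd_pairwise (l : List Int) (h : l.Pairwise (fun a b => b ≤ a)) :
    (pvCdd l).Pairwise (fun a b => b < a) := by
  induction l with
  | nil => simp [pvCdd]
  | cons a l ih =>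
    cases l with
    | nil => simp [pvCdd]
    | cons b rest =>
      rcases List.pairwise_cons.1 h with ⟨ha, htail⟩
      by_cases hab : a = b
      · simpa [pvCdd, hab] using ih htail
      · simp only [pvCdd, if_neg hab]
        refine List.Pairwise.cons ?_ (ih htail)
        intro x hx
        rw [pv_mem_cdd] at hx
        have hxb : x ≤ b := by
          rcases List.mem_cons.1 hx with rfl | hx'
          · exact le_rfl
          · exact (List.pairwise_cons.1 htail).1 x hx'
        have hba : b ≤ a := ha b (by simp)
        omega

lemma pv_takeWhile_cdd (p : Int → Bool) (l : List Int) :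
    (pvCdd l).takeWhile p = pvCdd (l.takeWhile p) := by
  induction l with
  | nil => simp [pvCdd]
  | cons a l ih =>
    cases l with
    | nil => cases hpa : p a <;> simp [pvCdd, List.takeWhile_cons, hpa]
    | cons b rest =>
      by_cases hab : a = b
      · subst hab
        have hdup : pvCdd (a :: a :: rest) = pvCdd (a :: rest) := by simp [pvCdd]
        rw [hdup, ih]
        cases hpa : p a
        · congr 1
          simp [List.takeWhile_cons, hpa]
        · have h2 : pvCdd (a :: a :: List.takeWhile p rest) = pvCdd (a :: List.takeWhile p rest) := by
            simp [pvCdd]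
          simp [List.takeWhile_cons, hpa, h2]
      · have hne : pvCdd (a :: b :: rest) = a :: pvCdd (b :: rest) := by simp [pvCdd, hab]
        rw [hne]
        cases hpa : p a
        · simp [List.takeWhile_cons, hpa, pvCdd]
        · rw [List.takeWhile_cons]
          conv_rhs => rw [List.takeWhile_cons]
          simp only [hpa, if_true]
          rw [ih]
          cases hX : List.takeWhile p (b :: rest) with
          | nil => simp [pvCdd]
          | cons y ys =>
            have hyb : y = b := by
              rw [List.takeWhile_cons] at hX
              cases hpb : p b
              · rw [hpb] at hX; simp at hX
              · rw [hpb] at hX; simp at hX; exact hX.1.symm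
            have hay : a ≠ y := hyb ▸ hab
            simp [pvCdd, hay]
lemma pv_dropWhile_cdd (p : Int → Bool) (l : List Int) :
    (pvCdd l).dropWhile p = pvCdd (l.dropWhile p) := by
  induction l with
  | nil => simp [pvCdd]
  | cons a l ih =>
    cases l with
    | nil => cases hpa : p a <;> simp [pvCdd, List.dropWhile_cons, hpa]
    | cons b rest =>
      by_cases hab : a = b
      · subst hab
        have hdup : pvCdd (a :: a :: rest) = pvCdd (a :: rest) := by simp [pvCdd]
        cases hpa : p a
        · obtain ⟨l', hl⟩ := pvCdd_cons a rest
          have hR : List.dropWhile p (a :: a :: rest) = a :: a :: rest := by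
            simp [List.dropWhile_cons, hpa]
          rw [hdup, hR, hdup, hl, List.dropWhile_cons]
          simp [hpa]
        · rw [hdup, ih]
          congr 1
          simp [List.dropWhile_cons, hpa]
      · have hne : pvCdd (a :: b :: rest) = a :: pvCdd (b :: rest) := by simp [pvCdd, hab]
        rw [hne]
        cases hpa : p a
        · have hR : List.dropWhile p (a :: b :: rest) = a :: b :: rest := by
            simp [List.dropWhile_cons, hpa]
          rw [hR, hne, List.dropWhile_cons]
          simp [hpa]
        · rw [List.dropWhile_cons]
          conv_rhs => rw [List.dropWhile_cons]
          simp only [hpa, if_true]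
          exact ih
lemma pvAWhile_eq (r : List Int) (h : PySem.Dict Int Int) (v i : Int) :
    pvAWhile h r v i =
      (pvInsertAll h (r.takeWhile (fun t => decide (v ≤ t))) i,
       r.dropWhile (fun t => decide (v ≤ t))) := by
  induction r generalizing h with
  | nil => simp [pvAWhile, pvInsertAll]
  | cons t rest ih =>
    by_cases hvt : v ≤ t
    · simp [pvAWhile, hvt, ih, List.takeWhile_cons, List.dropWhile_cons, pvInsertAll]
    · simp [pvAWhile, hvt, List.takeWhile_cons, List.dropWhile_cons, pvInsertAll]

lemma pvInsertAll_cdd (l : List Int) (h : PySem.Dict Int Int) (i : Int) :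
    pvInsertAll h l i = pvInsertAll h (pvCdd l) i := by
  induction l generalizing h with
  | nil => simp [pvCdd]
  | cons a l ih =>
    cases l with
    | nil => simp [pvCdd]
    | cons b rest =>
      by_cases hab : a = b
      · subst hab
        have : pvInsertAll h (a :: a :: rest) i = pvInsertAll h (a :: rest) i := by
          simp only [pvInsertAll, List.foldl_cons]
          rw [pv_insert_twice]
        rw [this, ih]
        simp [pvCdd]
      · simp only [pvCdd, if_neg hab]
        show pvInsertAll (h.insert a i) (b :: rest) i = pvInsertAll (h.insert a i) (pvCdd (b :: rest)) i
        exact ih (h.insert a i)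

lemma pvALoop_cdd (vs : List Int) (h : PySem.Dict Int Int) (r : List Int) (i : Int) :
    pvALoop h r i vs = pvALoop h (pvCdd r) i vs := by
  induction vs generalizing h r i with
  | nil => simp [pvALoop]
  | cons v vs ih =>
    simp only [pvALoop, pvAWhile_eq]
    rw [pv_takeWhile_cdd, pv_dropWhile_cdd, ← pvInsertAll_cdd]
    have hEmp : ((r.dropWhile (fun t => decide (v ≤ t))).isEmpty)
        = ((pvCdd (r.dropWhile (fun t => decide (v ≤ t)))).isEmpty) := by
      rcases hd : r.dropWhile (fun t => decide (v ≤ t)) with _ | ⟨x, xs⟩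
      · simp [pvCdd]
      · obtain ⟨l', hl⟩ := pvCdd_cons x xs
        simp [hl]
    rw [← hEmp]
    cases hE : (r.dropWhile (fun t => decide (v ≤ t))).isEmpty
    · simp only [Bool.false_eq_true, if_false]
      exact ih _ _ _
    · simp

lemma pvInsertAll_items (l : List Int) (h : PySem.Dict Int Int) (i : Int)
    (hnd : l.Nodup) (hfresh : ∀ t ∈ l, h.contains t = false) :
    (pvInsertAll h l i).items = h.items ++ l.map (fun t => (t, i)) := by
  induction l generalizing h with
  | nil => simp [pvInsertAll]
  | cons t rest ih =>
    have hft : h.contains t = false := hfresh t (by simp)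
    have hstep : pvInsertAll h (t :: rest) i = pvInsertAll (h.insert t i) rest i := rfl
    rw [hstep, ih (h.insert t i) (List.nodup_cons.1 hnd).2 ?fresh]
    · rw [PySem.Dict.items_insert_of_not_contains h i hft]
      simp
    case fresh =>
      intro u hu
      rw [PySem.Dict.contains_insert]
      have hne : u ≠ t := fun e => (List.nodup_cons.1 hnd).1 (e ▸ hu)
      simp [hne, hfresh u (by simp [hu])]

-- main characterisation of A's loop on a strictly descending remaining list
lemma pvALoop_items (vs : List Int) (r : List Int) (h : PySem.Dict Int Int) (i : Int)
    (hp : r.Pairwise (fun a b => b < a)) (hfresh : ∀ t ∈ r, h.contains t = false) :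
    (pvALoop h r i vs).items =
      h.items ++ r.filterMap (fun t => (pvF vs t).map (fun (j : Nat) => (t, i + (j : Int)))) := by
  induction vs generalizing r h i with
  | nil => simp [pvALoop, pvF]
  | cons v vs ih =>
    have hsplit : r.takeWhile (fun t => decide (v ≤ t)) ++ r.dropWhile (fun t => decide (v ≤ t)) = r :=
      List.takeWhile_append_dropWhile
    have hp1 : (r.takeWhile (fun t => decide (v ≤ t))).Pairwise (fun a b => b < a) :=
      List.Pairwise.sublist (List.takeWhile_sublist _) hp
    have hp2 : (r.dropWhile (fun t => decide (v ≤ t))).Pairwise (fun a b => b < a) :=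
      List.Pairwise.sublist (List.dropWhile_sublist _) hp
    have hcross : ∀ a ∈ r.takeWhile (fun t => decide (v ≤ t)),
        ∀ b ∈ r.dropWhile (fun t => decide (v ≤ t)), b < a := by
      have h2 := hp
      rw [← hsplit] at h2
      exact (List.pairwise_append.1 h2).2.2
    have hnd1 : (r.takeWhile (fun t => decide (v ≤ t))).Nodup := hp1.imp (fun h => ne_of_gt h)
    have hitems : (pvInsertAll h (r.takeWhile (fun t => decide (v ≤ t))) i).items
        = h.items ++ (r.takeWhile (fun t => decide (v ≤ t))).map (fun t => (t, i)) :=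
      pvInsertAll_items _ h i hnd1 (fun t ht => hfresh t ((List.takeWhile_sublist _).subset ht))
    have hsome : ∀ t ∈ r.takeWhile (fun t => decide (v ≤ t)),
        ((pvF (v :: vs) t).map (fun (j : Nat) => (t, i + (j : Int)))) = some (t, i) := by
      intro t ht
      have hqt : decide (v ≤ t) = true := List.mem_takeWhile_imp (p := fun t => decide (v ≤ t)) ht
      simp only [pvF, List.findIdx?_cons, hqt, if_true]
      simp
    have hmapeq : (r.takeWhile (fun t => decide (v ≤ t))).filterMap
        (fun t => (pvF (v :: vs) t).map (fun (j : Nat) => (t, i + (j : Int))))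
        = (r.takeWhile (fun t => decide (v ≤ t))).map (fun t => (t, i)) := by
      rw [List.filterMap_congr hsome]
      rw [show (fun t : Int => some (t, i)) = some ∘ (fun t : Int => (t, i)) from rfl,
        List.filterMap_eq_map]
    simp only [pvALoop]
    rw [pvAWhile_eq]
    by_cases hr2 : r.dropWhile (fun t => decide (v ≤ t)) = []
    · rw [hr2]
      simp only [List.isEmpty_nil, if_true]
      rw [hitems]
      have hrr : r = r.takeWhile (fun t => decide (v ≤ t)) := by
        conv_lhs => rw [← hsplit]
        rw [hr2, List.append_nil]
      conv_rhs => rw [hrr]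
      rw [hmapeq]
    · have hne : (r.dropWhile (fun t => decide (v ≤ t))).isEmpty = false := by
        simp [List.isEmpty_iff, hr2]
      rw [hne]
      simp only [Bool.false_eq_true, if_false]
      have hfresh' : ∀ u ∈ r.dropWhile (fun t => decide (v ≤ t)),
          (pvInsertAll h (r.takeWhile (fun t => decide (v ≤ t))) i).contains u = false := by
        intro u hu
        have hunotin : u ∉ r.takeWhile (fun t => decide (v ≤ t)) := by
          intro hin
          exact absurd (hcross u hin u hu) (lt_irrefl u)
        have h1 : h.contains u = false := hfresh u ((List.dropWhile_sublist _).subset hu)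
        show ((pvInsertAll h (r.takeWhile (fun t => decide (v ≤ t))) i).items.any
          (fun p => p.1 == u)) = false
        rw [hitems, List.any_append]
        have h2 : (h.items.any (fun p => p.1 == u)) = false := h1
        rw [h2, List.any_map]
        simp only [Bool.false_or, List.any_eq_false]
        intro t ht
        simp only [Function.comp]
        intro e
        exact hunotin ((beq_iff_eq.1 e) ▸ ht)
      rw [ih _ _ _ hp2 hfresh', hitems]
      have hqf : ∀ t ∈ r.dropWhile (fun t => decide (v ≤ t)), ¬ v ≤ t := by
        rcases hd : r.dropWhile (fun t => decide (v ≤ t)) with _ | ⟨t0, r2'⟩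
        · intro t ht; simp at ht
        · intro t ht
          have hP := List.head?_dropWhile_not (fun t => decide (v ≤ t)) r
          rw [hd] at hP
          simp only [List.head?_cons] at hP
          have ht0 : ¬ v ≤ t0 := by simpa using hP
          rcases List.mem_cons.1 ht with rfl | ht'
          · exact ht0
          · have hlt : t < t0 := by
              have := hp2
              rw [hd] at this
              exact (List.pairwise_cons.1 this).1 t ht'
            omega
      have hdropf : ∀ t ∈ r.dropWhile (fun t => decide (v ≤ t)),
          ((pvF (v :: vs) t).map (fun (j : Nat) => (t, i + (j : Int))))
            = (pvF vs t).map (fun (j : Nat) => (t, (i + 1) + (j : Int))) := by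
        intro t ht
        have hlt := hqf t ht
        simp only [pvF, List.findIdx?_cons, decide_eq_true_eq]
        rw [if_neg (by simpa using hlt)]
        cases hF : List.findIdx? (fun v => decide (v ≤ t)) vs with
        | none => simp
        | some j =>
          simp only [Option.map_some]
          congr 1
          push_cast
          ring
      conv_rhs => rw [← hsplit]
      rw [List.filterMap_append, hmapeq, List.filterMap_congr hdropf]
      simp [List.append_assoc]

-- the staircase answers "first index ≤ t" queries
lemma pvRecords_find (vs : List Int) (m : Option Int) (i t : Int)
    (hm : ∀ mv, m = some mv → ¬ mv ≤ t) :
    ((pvRecords m i vs).find? (fun p => decide (p.1 ≤ t))).map Prod.snd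
      = (pvF vs t).map (fun (j : Nat) => i + (j : Int)) := by
  induction vs generalizing m i with
  | nil => cases m <;> simp [pvRecords, pvF]
  | cons v vs ih =>
    have harith : ∀ (i : Int),
        ((pvF vs t).map (fun (j : Nat) => (i + 1) + (j : Int)))
          = (Option.map (fun j => j + 1) (pvF vs t)).map (fun (j : Nat) => i + (j : Int)) := by
      intro i
      cases hF : pvF vs t with
      | none => simp
      | some j => simp only [Option.map_some]; congr 1; push_cast; ring
    by_cases hvt : v ≤ t
    · cases m with
      | none =>
        simp only [pvRecords]
        rw [List.find?_cons_of_pos (by simpa using hvt)]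
        simp [pvF, List.findIdx?_cons, hvt]
      | some mv =>
        have hlt : v < mv := by
          by_contra hge
          exact hm mv rfl (le_trans (not_lt.1 hge) hvt)
        simp only [pvRecords, if_pos hlt]
        rw [List.find?_cons_of_pos (by simpa using hvt)]
        simp [pvF, List.findIdx?_cons, hvt]
    · have htail : ∀ (mv : Int), some v = some mv → ¬ mv ≤ t := by
        intro mv e; cases e; exact hvt
      cases m with
      | none =>
        simp only [pvRecords]
        rw [List.find?_cons_of_neg (by simpa using hvt)]
        rw [ih (some v) (i + 1) htail]
        simp only [pvF, List.findIdx?_cons]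
        rw [if_neg (by simpa using hvt)]
        exact harith i
      | some mv =>
        by_cases hlt : v < mv
        · simp only [pvRecords, if_pos hlt]
          rw [List.find?_cons_of_neg (by simpa using hvt)]
          rw [ih (some v) (i + 1) htail]
          simp only [pvF, List.findIdx?_cons]
          rw [if_neg (by simpa using hvt)]
          exact harith i
        · simp only [pvRecords, if_neg hlt]
          rw [ih (some mv) (i + 1) (fun mv' e => by cases e; exact hm mv rfl)]
          simp only [pvF, List.findIdx?_cons]
          rw [if_neg (by simpa using hvt)]
          exact harith i

lemma pv_dropWhile_dropWhile {α : Type} (p q : α → Bool) (l : List α)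
    (h : ∀ a, p a = true → q a = true) :
    (l.dropWhile p).dropWhile q = l.dropWhile q := by
  induction l with
  | nil => simp
  | cons a l ih =>
    cases hpa : p a
    · simp [List.dropWhile_cons, hpa]
    · have hqa := h a hpa
      simp [List.dropWhile_cons, hpa, hqa, ih]

lemma pv_find?_eq_head?_dropWhile {α : Type} (p : α → Bool) (l : List α) :
    l.find? p = (l.dropWhile (fun a => !p a)).head? := by
  induction l with
  | nil => simp
  | cons a l ih =>
    cases hpa : p a
    · simp [List.find?_cons, hpa, List.dropWhile_cons, ih]
    · simp [List.find?_cons, hpa, List.dropWhile_cons]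

-- main characterisation of B's merge
lemma pvMerge_items (ts : List Int) (recs : List (Int × Int))
    (hp : ts.Pairwise (fun a b => b ≤ a)) :
    pvMerge ts recs =
      ts.filterMap (fun t => (recs.find? (fun p => decide (p.1 ≤ t))).map (fun p => (t, p.2))) := by
  induction ts generalizing recs with
  | nil => simp [pvMerge]
  | cons t ts ih =>
    rcases List.pairwise_cons.1 hp with ⟨hts, htail⟩
    have hpq : (fun p : Int × Int => decide (t < p.1)) = (fun p : Int × Int => !(decide (p.1 ≤ t))) := by
      funext p
      by_cases hh : p.1 ≤ t <;> simp [hh] <;> omega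
    have hfind : recs.find? (fun p => decide (p.1 ≤ t))
        = (recs.dropWhile (fun p => decide (t < p.1))).head? := by
      rw [pv_find?_eq_head?_dropWhile, ← hpq]
    simp only [pvMerge]
    cases hrec : recs.dropWhile (fun p => decide (t < p.1)) with
    | nil =>
      have hall : ∀ x ∈ recs, decide (t < x.1) = true := List.dropWhile_eq_nil_iff.1 hrec
      have hnone : ∀ t' ∈ t :: ts,
          ((recs.find? (fun p => decide (p.1 ≤ t'))).map (fun p => (t', p.2))) = none := by
        intro t' ht'
        have hle : t' ≤ t := by
          rcases List.mem_cons.1 ht' with rfl | hmem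
          · exact le_rfl
          · exact hts t' hmem
        have hfn : recs.find? (fun p => decide (p.1 ≤ t')) = none := by
          rw [List.find?_eq_none]
          intro x hx
          have hxt := of_decide_eq_true (hall x hx)
          simp
          omega
        simp [hfn]
      rw [List.filterMap_congr hnone]
      simp
    | cons pr rest =>
      obtain ⟨pv1, pidx⟩ := pr
      rw [List.filterMap_cons]
      have hft : recs.find? (fun p => decide (p.1 ≤ t)) = some (pv1, pidx) := by
        rw [hfind, hrec]
        rfl
      rw [hft]
      simp only [Option.map_some]
      rw [ih _ htail]
      congr 1
      apply List.filterMap_congr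
      intro t' ht'
      have hle : t' ≤ t := hts t' ht'
      have himp : ∀ p : Int × Int, (!decide (p.1 ≤ t)) = true → (!decide (p.1 ≤ t')) = true := by
        intro p hp
        simp at hp ⊢
        omega
      have hsame : ((pv1, pidx) :: rest).find? (fun p => decide (p.1 ≤ t'))
          = recs.find? (fun p => decide (p.1 ≤ t')) := by
        rw [pv_find?_eq_head?_dropWhile, pv_find?_eq_head?_dropWhile]
        rw [← hrec, hpq]
        rw [pv_dropWhile_dropWhile _ _ _ himp]
      rw [hsame]

lemma pvUpdate_items (l : List (Int × Int)) (d : PySem.Dict Int Int)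
    (hnd : (l.map Prod.fst).Nodup) (hfresh : ∀ p ∈ l, d.contains p.1 = false) :
    (d.update l).items = d.items ++ l := by
  induction l generalizing d with
  | nil => simp [PySem.Dict.update]
  | cons p rest ih =>
    obtain ⟨k, v⟩ := p
    have hstep : d.update ((k, v) :: rest) = (d.insert k v).update rest := rfl
    rw [List.map_cons] at hnd
    have hnd' := List.nodup_cons.1 hnd
    rw [hstep, ih _ hnd'.2 ?fresh]
    · rw [PySem.Dict.items_insert_of_not_contains d v (hfresh (k, v) (by simp))]
      simp
    case fresh =>
      intro u hu
      rw [PySem.Dict.contains_insert]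
      have h1 : u.1 ≠ k := by
        intro e
        have hm : u.1 ∈ rest.map Prod.fst := List.mem_map_of_mem (f := Prod.fst) hu
        rw [e] at hm
        exact hnd'.1 hm
      simp [h1, hfresh u (by simp [hu])]

lemma pvDict_ofList_items (l : List (Int × Int)) (hnd : (l.map Prod.fst).Nodup) :
    (PySem.Dict.ofList l).items = l := by
  have h := pvUpdate_items l PySem.Dict.empty hnd (fun p _ => by simp [pysem])
  simpa [PySem.Dict.ofList] using h

lemma pv_map_fst_filterMap_sublist (ts : List Int) (f : Int → Option (Int × Int))
    (hf : ∀ t, ∀ p ∈ f t, p.1 = t) :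
    ((ts.filterMap f).map Prod.fst).Sublist ts := by
  induction ts with
  | nil => simp
  | cons t ts ih =>
    rw [List.filterMap_cons]
    cases hft : f t with
    | none => exact List.Sublist.cons t ih
    | some p =>
      have hp1 : p.1 = t := hf t p (by simp [hft])
      simp only [List.map_cons, hp1]
      exact List.Sublist.cons₂ t ih

-- B's unique descending threshold list is A's sorted list with adjacent duplicates collapsed
lemma pvD_eq_cdd (thresholds : List Int) :
    PySem.List.sorted (PySem.Set.ofList thresholds) (fun t => t) true
      = pvCdd (PySem.List.sorted thresholds (fun t => t) true) := by
  have hpr : (PySem.List.sorted thresholds (fun t => t) true).Pairwise (fun a b => b ≤ a) :=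
    PySem.List.sorted_pairwise_rev thresholds (fun t => t)
  have hgt := pvCdd_pairwise _ hpr
  have hnd : (pvCdd (PySem.List.sorted thresholds (fun t => t) true)).Nodup :=
    hgt.imp (fun h => ne_of_gt h)
  have hperm : (pvCdd (PySem.List.sorted thresholds (fun t => t) true)).Perm
      (PySem.Set.ofList thresholds) := by
    rw [List.perm_ext_iff_of_nodup hnd (PySem.Set.nodup_ofList thresholds)]
    intro x
    rw [pv_mem_cdd, PySem.List.mem_sorted, PySem.Set.mem_ofList]
  exact PySem.List.sorted_rev_eq_of_perm_of_pairwise_gt _ _ _ hperm hgt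

-- ===== VERDICT (by name: the statement is the Claim_ definition above) =====
theorem first_entries_le_spec : Claim_equal_first_entries_le := by
  intro values thresholds _
  unfold Spec_first_entries_le first_entries_le first_entries_le_alt
  have hpr : (PySem.List.sorted thresholds (fun t => t) true).Pairwise (fun a b => b ≤ a) :=
    PySem.List.sorted_pairwise_rev thresholds (fun t => t)
  have hgt := pvCdd_pairwise _ hpr
  have hndD : (pvCdd (PySem.List.sorted thresholds (fun t => t) true)).Nodup :=
    hgt.imp (fun h => ne_of_gt h)
  rw [pvALoop_cdd]
  rw [pvALoop_items values _ PySem.Dict.empty 0 hgt (fun t _ => by simp [pysem])]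
  rw [pvD_eq_cdd]
  rw [pvMerge_items _ _ (hgt.imp (fun h => le_of_lt h))]
  have hfun : ∀ t ∈ pvCdd (PySem.List.sorted thresholds (fun t => t) true),
      (((pvRecords none 0 values).find? (fun p => decide (p.1 ≤ t))).map (fun p => (t, p.2)))
        = (pvF values t).map (fun (j : Nat) => (t, (0 : Int) + (j : Int))) := by
    intro t _
    have hsnd := pvRecords_find values none 0 t (by intro mv e; cases e)
    cases hF : (pvRecords none 0 values).find? (fun p => decide (p.1 ≤ t)) with
    | none =>
      rw [hF] at hsnd
      cases hG : pvF values t with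
      | none => simp
      | some j => rw [hG] at hsnd; simp at hsnd
    | some p =>
      rw [hF] at hsnd
      cases hG : pvF values t with
      | none => rw [hG] at hsnd; simp at hsnd
      | some j =>
        rw [hG] at hsnd
        simp only [Option.map_some, Option.some_inj] at hsnd
        simp only [Option.map_some, Option.some_inj]
        rw [hsnd]
  rw [List.filterMap_congr hfun]
  have hsub := pv_map_fst_filterMap_sublist (pvCdd (PySem.List.sorted thresholds (fun t => t) true))
    (fun t => (pvF values t).map (fun (j : Nat) => (t, (0 : Int) + (j : Int))))
    (by
      intro t p hp
      simp only [Option.mem_def] at hp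
      cases hG : pvF values t with
      | none => rw [hG] at hp; simp at hp
      | some j =>
        rw [hG] at hp
        simp only [Option.map_some, Option.some_inj] at hp
        rw [← hp])
  rw [pvDict_ofList_items _ (hsub.nodup hndD)]
  simp [PySem.Dict.empty]
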